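-- pv_equiv track=rewrite | github.com/Paco-Murillo/Encripta-Chat | encode.py | getchar
-- ===== SOURCE A (Python) =====
-- def getchar(int):
--     dic = {'☺': 0, '☻': 1, '♥': 2, '♦': 3, '♣': 4, '♠': 5, '•': 176, '◘': 7, '○': 8, '◙': 9, '♂': 10, '♀': 11, '♪': 12,
--            '♫': 13, '☼': 14, '►': 15, '◄': 16, '↕': 17, '‼': 18, '¶': 233, '§': 234, '▬': 21, '↨': 22, '↑': 23, '↓': 24,
--            '→': 25, '←': 26, '∟': 27, '↔': 28, '▲': 29, '▼': 30, ' ': 31, '!': 32, '"': 33, '#': 34, '$': 35, '%': 36,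
--            '&': 37, "'": 38, '(': 39, ')': 40, '*': 41, '+': 42, ',': 43, '-': 44, '.': 45, '/': 46, '0': 47, '1': 48,
--            '2': 49, '3': 50, '4': 51, '5': 52, '6': 53, '7': 54, '8': 55, '9': 56, ':': 57, ';': 58, '<': 59, '=': 60,
--            '>': 61, '?': 62, '@': 63, 'A': 64, 'B': 65, 'C': 66, 'D': 67, 'E': 68, 'F': 69, 'G': 70, 'H': 71, 'I': 72,
--            'J': 73, 'K': 74, 'L': 75, 'M': 76, 'N': 77, 'O': 78, 'P': 79, 'Q': 80, 'R': 81, 'S': 82, 'T': 83, 'U': 84,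
--            'V': 85, 'W': 86, 'X': 87, 'Y': 88, 'Z': 89, '[': 90, '²': 91, ']': 92, '^': 93, '_': 94, '`': 95, 'a': 96,
--            'b': 97, 'c': 98, 'd': 99, 'e': 100, 'f': 101, 'g': 102, 'h': 103, 'i': 104, 'j': 105, 'k': 106, 'l': 107,
--            'm': 108, 'n': 109, 'o': 110, 'p': 111, 'q': 112, 'r': 113, 's': 114, 't': 115, 'u': 116, 'v': 117, 'w': 118,
--            'x': 119, 'y': 120, 'z': 121, '{': 122, '|': 123, '}': 124, '~': 125, '⌂': 126, 'Ç': 127, 'ü': 128, 'é': 129,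
--            'â': 130, 'ä': 131, 'à': 132, 'å': 133, 'ç': 134, 'ê': 135, 'ë': 136, 'è': 137, 'ï': 138, 'î': 139, 'ì': 140,
--            'Ä': 141, 'Å': 142, 'É': 143, 'ø': 144, '£': 145, '×': 147, 'ƒ': 148, 'á': 149, 'í': 150, 'ó': 151, 'ú': 152,
--            'ñ': 153, 'Ñ': 154, 'ª': 155, 'º': 156, '¿': 157, '®': 158, '¬': 159, '½': 160, '¼': 161, '¡': 162, '«': 163,
--            '»': 164, '░': 165, '▒': 166, '▓': 167, '│': 168, '┤': 169, 'Á': 170, 'Â': 171, 'À': 172, '©': 173, '╣': 174,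
--            '║': 175, '╝': 177, '¢': 178, '¥': 179, '┐': 180, '└': 181, '┴': 182, '┬': 183, '├': 184, '─': 185, '┼': 186,
--            'ã': 187, 'Ã': 188, '╚': 189, '╔': 190, '╩': 191, '╦': 192, '╠': 193, '═': 194, '╬': 195, '¤': 196, 'ð': 197,
--            'Ð': 198, 'Ê': 199, 'Ë': 200, 'È': 201, 'ı': 202, 'Í': 203, 'Î': 204, 'Ï': 205, '┘': 206, '┌': 207, '█': 208,
--            '▄': 209, '¦': 210, 'Ì': 211, '▀': 212, 'Ó': 213, 'ß': 214, 'Ô': 215, 'Ò': 216, 'õ': 217, 'Õ': 218, 'µ': 219,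
--            'þ': 220, 'Þ': 221, 'Ú': 222, 'Û': 223, 'Ù': 224, 'ý': 225, 'Ý': 226, '¯': 227, '´': 228, '■': 229, '±': 230,
--            '‗': 231, '¾': 232, '÷': 235, '¸': 236, '°': 237, '¨': 238, '·': 239, '¹': 240, '³': 241}
--     for key, value in dic.items():
--         if(value == int):
--             return key
--     return "NULL"
-- ===== SOURCE B (Python) =====
-- # Index-addressed table: a list where position n holds the character for code n
-- # (the codes absent from the original table hold a placeholder, never reached
-- # thanks to the guard), so each call is a bounds check plus one list index
-- # instead of a scan over the whole dict.
-- _TABLE = ['☺', '☻', '♥', '♦', '♣', '♠', '\x00', '◘', '○', '◙', '♂', '♀', '♪', '♫', '☼', '►', '◄', '↕', '‼', '\x00', '\x00', '▬', '↨', '↑', '↓', '→', '←', '∟', '↔', '▲', '▼', ' ', '!', '"', '#', '$', '%', '&', "'", '(', ')', '*', '+', ',', '-', '.', '/', '0', '1', '2', '3', '4', '5', '6', '7', '8', '9', ':', ';', '<', '=', '>', '?', '@', 'A', 'B', 'C', 'D', 'E', 'F', 'G', 'H', 'I', 'J', 'K', 'L', 'M', 'N', 'O', 'P', 'Q', 'R',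 'S', 'T', 'U', 'V', 'W', 'X', 'Y', 'Z', '[', '²', ']', '^', '_', '`', 'a', 'b', 'c', 'd', 'e', 'f', 'g', 'h', 'i', 'j', 'k', 'l', 'm', 'n', 'o', 'p', 'q', 'r', 's', 't', 'u', 'v', 'w', 'x', 'y', 'z', '{', '|', '}', '~', '⌂', 'Ç', 'ü', 'é', 'â', 'ä', 'à', 'å', 'ç', 'ê', 'ë', 'è', 'ï', 'î', 'ì', 'Ä', 'Å', 'É', 'ø', '£', '\x00', '×', 'ƒ', 'á', 'í', 'ó', 'ú', 'ñ', 'Ñ', 'ª', 'º', '¿', '®', '¬', '½', '¼', '¡', '«', '»', '░', '▒', '▓', '│', '┤', 'Á', 'Â', 'À', '©', '╣', '║', '•', '╝', '¢', '¥', '┐', '└', '┴', '┬', '├', '─', '┼', 'ã', 'Ã', '╚', '╔', '╩', '╦', '╠', '═', '╬', '¤', 'ð', 'Ð', 'Ê', 'Ë', 'È', 'ı', 'Í', 'Î', 'Ï', '┘', '┌', '█', '▄', '¦', 'Ì', '▀', 'Ó', 'ß', 'Ô', 'Ò', 'õ', 'Õ', 'µ', 'þ', 'Þ', 'Ú', 'Û',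 'Ù', 'ý', 'Ý', '¯', '´', '■', '±', '‗', '¾', '¶', '§', '÷', '¸', '°', '¨', '·', '¹', '³']
--
--
-- def getchar(int):
--     if 0 <= int <= 241 and int not in (6, 19, 20, 146):
--         return _TABLE[int]
--     return "NULL"
-- ===== Notes on version B (the rewrite author's own statement) =====
-- stated objective: alternative
-- what changed: B replaces A's per-call linear scan of the char->code dict with a position-addressed table (slot n holds the char for code n) behind a range/gap guard, so each call is a bounds check plus one index; per-call cost is too small for a timing run to verify a speedup.
import Mathlib
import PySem

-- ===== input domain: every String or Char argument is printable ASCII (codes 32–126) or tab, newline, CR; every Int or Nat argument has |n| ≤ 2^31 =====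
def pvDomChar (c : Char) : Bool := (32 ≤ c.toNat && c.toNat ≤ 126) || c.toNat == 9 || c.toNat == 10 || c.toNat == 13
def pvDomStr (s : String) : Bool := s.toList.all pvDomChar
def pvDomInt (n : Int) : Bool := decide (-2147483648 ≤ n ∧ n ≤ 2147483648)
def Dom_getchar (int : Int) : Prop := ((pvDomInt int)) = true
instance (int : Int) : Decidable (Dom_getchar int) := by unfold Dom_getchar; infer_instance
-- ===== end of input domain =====

-- B answers each call with one index into a position-addressed table (slot n =
-- char for code n) behind a range/gap guard, instead of A's per-call linear scan
-- of the char->code dict.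

-- ===== PORT A =====
-- A's dict literal, as the (char, code) association list its for-loop iterates over.
def getcharTable : List (String × Int) := [("☺", 0), ("☻", 1), ("♥", 2), ("♦", 3), ("♣", 4), ("♠", 5), ("•", 176), ("◘", 7), ("○", 8), ("◙", 9), ("♂", 10), ("♀", 11), ("♪", 12), ("♫", 13), ("☼", 14), ("►", 15), ("◄", 16), ("↕", 17), ("‼", 18), ("¶", 233), ("§", 234), ("▬", 21), ("↨", 22), ("↑", 23), ("↓", 24), ("→", 25), ("←", 26), ("∟", 27), ("↔", 28), ("▲", 29), ("▼", 30), (" ", 31), ("!", 32), ("\"", 33), ("#", 34), ("$", 35), ("%", 36), ("&", 37), ("'", 38), ("(", 39), (")", 40), ("*", 41), ("+", 42), (",", 43), ("-", 44), (".", 45), ("/", 46), ("0", 47), ("1", 48), ("2", 49), ("3", 50), ("4", 51), ("5", 52), ("6", 53), ("7", 54), ("8", 55), ("9", 56), (":", 57), (";", 58), ("<", 59), ("=", 60), (">", 61), ("?", 62), ("@", 63), ("A", 64), ("B", 65), ("C", 66), ("D", 67), ("E", 68), ("F", 69), ("G", 70), ("H", 71), ("I", 72), ("J", 73), ("K", 74),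 ("L", 75), ("M", 76), ("N", 77), ("O", 78), ("P", 79), ("Q", 80), ("R", 81), ("S", 82), ("T", 83), ("U", 84), ("V", 85), ("W", 86), ("X", 87), ("Y", 88), ("Z", 89), ("[", 90), ("²", 91), ("]", 92), ("^", 93), ("_", 94), ("`", 95), ("a", 96), ("b", 97), ("c", 98), ("d", 99), ("e", 100), ("f", 101), ("g", 102), ("h", 103), ("i", 104), ("j", 105), ("k", 106), ("l", 107), ("m", 108), ("n", 109), ("o", 110), ("p", 111), ("q", 112), ("r", 113), ("s", 114), ("t", 115), ("u", 116), ("v", 117), ("w", 118), ("x", 119), ("y", 120), ("z", 121), ("{", 122), ("|", 123), ("}", 124), ("~", 125), ("⌂", 126), ("Ç", 127), ("ü", 128), ("é", 129), ("â", 130), ("ä", 131), ("à", 132), ("å", 133), ("ç", 134), ("ê", 135), ("ë", 136), ("è", 137), ("ï", 138), ("î", 139), ("ì", 140), ("Ä", 141), ("Å", 142), ("É", 143), ("ø", 144), ("£", 145), ("×", 147), ("ƒ", 148), ("á", 149), ("í", 150), ("ó", 151), ("ú", 152), ("ñ", 153), ("Ñ", 154), ("ª", 155), ("º", 156), ("¿",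 157), ("®", 158), ("¬", 159), ("½", 160), ("¼", 161), ("¡", 162), ("«", 163), ("»", 164), ("░", 165), ("▒", 166), ("▓", 167), ("│", 168), ("┤", 169), ("Á", 170), ("Â", 171), ("À", 172), ("©", 173), ("╣", 174), ("║", 175), ("╝", 177), ("¢", 178), ("¥", 179), ("┐", 180), ("└", 181), ("┴", 182), ("┬", 183), ("├", 184), ("─", 185), ("┼", 186), ("ã", 187), ("Ã", 188), ("╚", 189), ("╔", 190), ("╩", 191), ("╦", 192), ("╠", 193), ("═", 194), ("╬", 195), ("¤", 196), ("ð", 197), ("Ð", 198), ("Ê", 199), ("Ë", 200), ("È", 201), ("ı", 202), ("Í", 203), ("Î", 204), ("Ï", 205), ("┘", 206), ("┌", 207), ("█", 208), ("▄", 209), ("¦", 210), ("Ì", 211), ("▀", 212), ("Ó", 213), ("ß", 214), ("Ô", 215), ("Ò", 216), ("õ", 217), ("Õ", 218), ("µ", 219), ("þ", 220), ("Þ", 221), ("Ú", 222), ("Û", 223), ("Ù", 224), ("ý", 225), ("Ý", 226), ("¯", 227), ("´", 228), ("■", 229), ("±", 230), ("‗", 231), ("¾", 232), ("÷", 235), ("¸",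 236), ("°", 237), ("¨", 238), ("·", 239), ("¹", 240), ("³", 241)]

-- A's for-loop: return the first key whose value equals `int`, else "NULL".
def getcharScan : List (String × Int) → Int → String
  | [], _ => "NULL"
  | (k, v) :: rest, n => if v == n then k else getcharScan rest n

def getchar (int : Int) : String := getcharScan getcharTable int

-- ===== PORT B =====
-- B's module-level _TABLE: slot n holds the char for code n (the placeholder at
-- the gap codes is never indexed: the guard excludes them).
def getcharTableL : List String := ["☺", "☻", "♥", "♦", "♣", "♠", "\x00", "◘", "○", "◙", "♂", "♀", "♪", "♫", "☼", "►", "◄", "↕", "‼", "\x00", "\x00", "▬", "↨", "↑", "↓", "→", "←", "∟", "↔", "▲", "▼", " ", "!", "\"", "#", "$", "%", "&", "'", "(", ")", "*", "+", ",", "-", ".", "/", "0", "1", "2", "3", "4", "5", "6", "7", "8", "9", ":", ";", "<", "=", ">", "?", "@", "A", "B", "C", "D", "E", "F", "G", "H", "I", "J", "K", "L", "M", "N", "O", "P", "Q", "R", "S", "T", "U", "V", "W", "X", "Y", "Z", "[", "²", "]", "^", "_", "`", "a", "b", "c", "d", "e", "f", "g", "h", "i", "j", "k", "l", "m", "n",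 "o", "p", "q", "r", "s", "t", "u", "v", "w", "x", "y", "z", "{", "|", "}", "~", "⌂", "Ç", "ü", "é", "â", "ä", "à", "å", "ç", "ê", "ë", "è", "ï", "î", "ì", "Ä", "Å", "É", "ø", "£", "\x00", "×", "ƒ", "á", "í", "ó", "ú", "ñ", "Ñ", "ª", "º", "¿", "®", "¬", "½", "¼", "¡", "«", "»", "░", "▒", "▓", "│", "┤", "Á", "Â", "À", "©", "╣", "║", "•", "╝", "¢", "¥", "┐", "└", "┴", "┬", "├", "─", "┼", "ã", "Ã", "╚", "╔", "╩", "╦", "╠", "═", "╬", "¤", "ð", "Ð", "Ê", "Ë", "È", "ı", "Í", "Î", "Ï", "┘", "┌", "█", "▄", "¦", "Ì", "▀", "Ó", "ß", "Ô", "Ò", "õ", "Õ", "µ", "þ", "Þ", "Ú", "Û", "Ù", "ý", "Ý", "¯", "´", "■", "±", "‗", "¾", "¶", "§", "÷", "¸", "°", "¨", "·", "¹", "³"]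

def getchar_alt (int : Int) : String :=
  if 0 ≤ int ∧ int ≤ 241 ∧ int ≠ 6 ∧ int ≠ 19 ∧ int ≠ 20 ∧ int ≠ 146 then
    (PySem.List.pyGet? getcharTableL int).getD "NULL"   -- guard makes the index in range; getD's default is never used
  else "NULL"

-- ===== PRECONDITION & SPEC =====
def Spec_getchar (int : Int) (out : String) : Prop := out = getchar_alt int
instance (int : Int) (out : String) : Decidable (Spec_getchar int out) := by unfold Spec_getchar; infer_instance

-- ===== CLAIM (what is proved, stated in full; the proofs are below) =====
def Claim_equal_getchar : Prop := ∀ (int : Int), Dom_getchar int → Spec_getchar int (getchar int)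

-- ===== LEMMAS AND PROOFS =====

-- A's scan returns "NULL" when no entry carries the requested code.
theorem getcharScan_null (l : List (String × Int)) (n : Int)
    (h : ∀ p ∈ l, p.2 ≠ n) : getcharScan l n = "NULL" := by
  induction l with
  | nil => rfl
  | cons p t ih =>
    obtain ⟨k, v⟩ := p
    have hv : v ≠ n := h (k, v) (List.mem_cons_self ..)
    simp only [getcharScan, beq_iff_eq, if_neg hv]
    exact ih fun q hq => h q (List.mem_cons_of_mem _ hq)

set_option maxRecDepth 16384 in
theorem getcharTable_codes_bounded :
    ∀ p ∈ getcharTable, 0 ≤ p.2 ∧ p.2 ≤ 241 := by decide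

set_option maxRecDepth 16384 in
set_option maxHeartbeats 4000000 in
theorem getchar_eq_alt_small :
    ((List.range 242).all fun m => getchar (m : Int) == getchar_alt (m : Int)) = true := by
  decide

-- ===== VERDICT (by name: the statement is the Claim_ definition above) =====
theorem getchar_spec : Claim_equal_getchar := by
  intro int _
  show getchar int = getchar_alt int
  by_cases h : 0 ≤ int ∧ int ≤ 241
  · have hm : int = ((int.toNat : Nat) : Int) := by omega
    have hmem : int.toNat ∈ List.range 242 := by
      rw [List.mem_range]; omega
    have := List.all_eq_true.mp getchar_eq_alt_small _ hmem
    rw [hm]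
    exact eq_of_beq this
  · have hA : getchar int = "NULL" := by
      refine getcharScan_null _ _ fun p hp => ?_
      have := getcharTable_codes_bounded p hp
      omega
    have hB : getchar_alt int = "NULL" := by
      rw [getchar_alt, if_neg]
      intro hc
      exact h ⟨hc.1, hc.2.1⟩
    rw [hA, hB]
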